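-- pv_equiv track=rewrite | github.com/ariel-frischer/alias-gen | aliaser.py | generate_easy_alias
-- ===== SOURCE A (Python) =====
-- import itertools
-- from typing import Dict, List, Set, Tuple
--
-- easy_chars = "asdfghjklqwertyuiopzxcvbnm"  # easy to reach on keyboard
--
-- def generate_easy_alias(cmd: str, used_easy_aliases: Set[str]) -> str:
--     alias = first_char = cmd[0]
--
--     if first_char not in used_easy_aliases:
--         return first_char
--
--     count = 0
--     while count < len(cmd):
--         count += 1
--         alias = cmd[0 : count + 1]
--         if alias not in used_easy_aliases:
--             return alias
--
--         permutations = itertools.permutations(easy_chars, count)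
--
--         for permutation in permutations:
--             alias = first_char + "".join(permutation)
--             if alias not in used_easy_aliases:
--                 return alias
--
--     return cmd
-- ===== SOURCE B (Python) =====
-- easy_chars = "asdfghjklqwertyuiopzxcvbnm"  # easy to reach on keyboard
--
-- def _npk(n, k):
--     # number of k-permutations of n items
--     return 1 if k == 0 else n * _npk(n - 1, k - 1)
--
-- def _perm_rank(s, remaining):
--     # rank of the string s in itertools order among permutations of
--     # `remaining` of length len(s); None if s is not such a permutation
--     if not s:
--         return 0
--     c = s[0]
--     if c not in remaining:
--         return None
--     i = remaining.index(c)
--     sub = _perm_rank(s[1:], remaining[:i] + remaining[i + 1:])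
--     if sub is None:
--         return None
--     return i * _npk(len(remaining) - 1, len(s) - 1) + sub
--
-- def _perm_unrank(remaining, k, r):
--     # the rank-r permutation of `remaining` of length k, in itertools order
--     if k == 0:
--         return ""
--     b = _npk(len(remaining) - 1, k - 1)
--     i = r // b
--     return remaining[i] + _perm_unrank(remaining[:i] + remaining[i + 1:], k - 1, r % b)
--
-- def _first_gap(sorted_ranks):
--     # smallest natural number not present in the sorted list
--     m = 0
--     for x in sorted_ranks:
--         if x == m:
--             m += 1
--         elif x > m:
--             break
--     return m
--
-- def generate_easy_alias(cmd, used_easy_aliases):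
--     # Arithmetic approach: no permutation is ever enumerated. Per stage,
--     # rank the used aliases that are stage candidates, take the first gap
--     # in the sorted ranks, and unrank it back into a permutation.
--     first = cmd[0]
--     if first not in used_easy_aliases:
--         return first
--     for count in range(1, len(cmd) + 1):
--         prefix = cmd[0 : count + 1]
--         if prefix not in used_easy_aliases:
--             return prefix
--         ranks = []
--         for u in used_easy_aliases:
--             if len(u) == count + 1 and u[0] == first:
--                 r = _perm_rank(u[1:], easy_chars)
--                 if r is not None:
--                     ranks.append(r)
--         m = _first_gap(sorted(ranks))
--         if m < _npk(len(easy_chars), count):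
--             return first + _perm_unrank(easy_chars, count, m)
--     return cmd
-- ===== Notes on version B (the rewrite author's own statement) =====
-- stated objective: alternative
-- what changed: Instead of enumerating permutations and testing each against the used set, B ranks each used alias into the itertools permutation order arithmetically (factorial-number-system ranking), takes the first gap in the sorted ranks, and unranks that gap back into a permutation; no permutation is ever enumerated.
-- outside the precondition, e.g. on generate_easy_alias('', set()): A raises IndexError, B raises IndexError
import Mathlib
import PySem

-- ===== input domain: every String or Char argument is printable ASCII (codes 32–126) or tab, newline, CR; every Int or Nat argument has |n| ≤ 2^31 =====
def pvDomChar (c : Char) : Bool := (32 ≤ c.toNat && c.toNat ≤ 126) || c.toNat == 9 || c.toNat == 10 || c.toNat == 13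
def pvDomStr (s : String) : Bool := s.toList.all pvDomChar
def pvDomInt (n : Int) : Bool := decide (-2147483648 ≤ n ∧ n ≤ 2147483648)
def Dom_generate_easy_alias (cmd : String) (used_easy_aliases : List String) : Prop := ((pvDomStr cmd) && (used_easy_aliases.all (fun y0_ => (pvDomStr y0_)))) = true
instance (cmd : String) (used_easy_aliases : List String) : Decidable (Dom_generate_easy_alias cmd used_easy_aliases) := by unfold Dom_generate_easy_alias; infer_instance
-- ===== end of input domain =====

-- B replaces A's permutation enumeration by arithmetic: it ranks the used aliases
-- into the permutation order, takes the first gap in the sorted ranks, and unranks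
-- that gap; objective: alternative algorithm (no permutation stream is enumerated).

-- ===== PORT A =====
def pvEasyChars : List Char := "asdfghjklqwertyuiopzxcvbnm".toList

-- inner 'for permutation in permutations: … return alias' loop of A (early return = some)
def pvPermScanA (first : Char) (used : List String) : List (List Char) → Option String
  | [] => none
  | p :: ps =>
    let aliasV := String.ofList (first :: p)          -- alias = first_char + "".join(permutation)
    if used.contains aliasV then pvPermScanA first used ps else some aliasV

-- A's 'while count < len(cmd)' loop; fuel = remaining iterations (len(cmd) - count)
def pvLoopA (cmd : String) (cmdL : List Char) (first : Char) (used : List String) :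
    Nat → Nat → String
  | _, 0 => cmd                                   -- loop exits: 'return cmd'
  | count, fuel + 1 =>
    let count := count + 1
    let aliasV := String.ofList (cmdL.take (count + 1))  -- cmd[0:count+1], nonneg bounds = take (exact)
    if used.contains aliasV then
      match pvPermScanA first used (PySem.List.permutations pvEasyChars count) with
      | some a => a
      | none => pvLoopA cmd cmdL first used count fuel
    else aliasV

def generate_easy_alias (cmd : String) (used_easy_aliases : List String) : String :=
  match cmd.toList with
  | [] => cmd                                     -- Python raises IndexError here (cmd[0]); excluded by Pre_
  | first :: _ =>
    let f := String.ofList [first]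
    if used_easy_aliases.contains f then
      pvLoopA cmd cmd.toList first used_easy_aliases 0 cmd.toList.length
    else f

-- ===== PORT B =====
-- _npk(n, k): number of k-permutations of n items
def pvNPk : Nat → Nat → Nat
  | _, 0 => 1
  | n, k + 1 => n * pvNPk (n - 1) k

-- _perm_rank(s, remaining): rank of s among permutations of `remaining` of length |s|
-- (none where Python returns None); remaining[:i]+remaining[i+1:] = eraseIdx i (exact)
def pvRankB : List Char → List Char → Option Nat
  | _, [] => some 0
  | remaining, c :: p =>
    match remaining.idxOf? c with                  -- 'if c not in remaining: None' + remaining.index(c)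
    | none => none
    | some i =>
      match pvRankB (remaining.eraseIdx i) p with
      | none => none
      | some r => some (i * pvNPk (remaining.length - 1) p.length + r)

-- _perm_unrank(remaining, k, r): the rank-r length-k permutation of `remaining`
def pvUnrankB : List Char → Nat → Nat → List Char
  | _, 0, _ => []
  | remaining, k + 1, r =>
    let b := pvNPk (remaining.length - 1) k
    match remaining[r / b]? with
    | some c => c :: pvUnrankB (remaining.eraseIdx (r / b)) (k) (r % b)
    | none => []                                   -- unreachable in B: caller guarantees r < npk

-- _first_gap(sorted_ranks): scan with early break
def pvFirstGap : List Nat → Nat → Nat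
  | [], m => m
  | x :: xs, m => if x = m then pvFirstGap xs (m + 1) else if m < x then m else pvFirstGap xs m

-- the 'ranks' accumulation loop over used aliases at stage `count`
def pvRanksB (used : List String) (first : Char) (count : Nat) : List Nat :=
  used.foldl (fun acc u =>
    match u.toList with
    | [] => acc                                    -- len(u) = 0 ≠ count+1
    | c :: p =>
      if p.length = count && c == first then       -- len(u) == count+1 and u[0] == first
        match pvRankB pvEasyChars p with
        | some r => acc ++ [r]
        | none => acc
      else acc) []

-- 'for count in range(1, len(cmd)+1)'; fuel = remaining iterations
def pvLoopB (cmdL : List Char) (first : Char) (used : List String) :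
    Nat → Nat → Option String
  | _, 0 => none
  | count, fuel + 1 =>
    let pre := String.ofList (cmdL.take (count + 1))
    if used.contains pre then
      let m := pvFirstGap ((pvRanksB used first count).mergeSort (· ≤ ·)) 0
      if m < pvNPk pvEasyChars.length count then
        some (String.ofList (first :: pvUnrankB pvEasyChars count m))
      else pvLoopB cmdL first used (count + 1) fuel
    else some pre

def generate_easy_alias_alt (cmd : String) (used_easy_aliases : List String) : String :=
  match cmd.toList with
  | [] => cmd                                     -- Python raises IndexError here (cmd[0]); excluded by Pre_
  | first :: _ =>
    if used_easy_aliases.contains (String.ofList [first]) then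
      (pvLoopB cmd.toList first used_easy_aliases 1 cmd.toList.length).getD cmd
    else String.ofList [first]

-- ===== PRECONDITION & SPEC =====
-- Pre_ excludes only the empty command, on which A raises IndexError (cmd[0]).
def Pre_generate_easy_alias (cmd : String) (used_easy_aliases : List String) : Prop := cmd ≠ ""
instance (cmd : String) (used_easy_aliases : List String) : Decidable (Pre_generate_easy_alias cmd used_easy_aliases) := by unfold Pre_generate_easy_alias; infer_instance
def pvWitness_generate_easy_alias : String × List String := ("git", ["g"])

def Spec_generate_easy_alias (cmd : String) (used_easy_aliases : List String) (out : String) : Prop := out = generate_easy_alias_alt cmd used_easy_aliases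
instance (cmd : String) (used_easy_aliases : List String) (out : String) : Decidable (Spec_generate_easy_alias cmd used_easy_aliases out) := by unfold Spec_generate_easy_alias; infer_instance

-- ===== CLAIM =====
def Claim_equal_generate_easy_alias : Prop := ∀ (cmd : String) (used_easy_aliases : List String), Dom_generate_easy_alias cmd used_easy_aliases → Pre_generate_easy_alias cmd used_easy_aliases → Spec_generate_easy_alias cmd used_easy_aliases (generate_easy_alias cmd used_easy_aliases)

-- ===== LEMMAS AND PROOFS =====

theorem pvEasyChars_nodup : pvEasyChars.Nodup := by decide

-- A's inner permutation scan is find? of the first unused alias on the mapped list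
theorem pvPermScanA_eq_find (first : Char) (used : List String) (ps : List (List Char)) :
    pvPermScanA first used ps
      = (ps.map (fun p => String.ofList (first :: p))).find? (fun c => !used.contains c) := by
  induction ps with
  | nil => rfl
  | cons p ps ih =>
    rw [List.map_cons, List.find?_cons, pvPermScanA]
    cases hb : used.contains (String.ofList (first :: p)) with
    | true => exact ih
    | false => rfl

-- length of the permutation list is the falling factorial
theorem pvPerm_length (k : Nat) : ∀ (xs : List Char),
    (PySem.List.permutations xs k).length = pvNPk xs.length k := by
  induction k with
  | zero => intro xs; rfl
  | succ k ih =>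
    intro xs
    show (List.flatMap _ (List.range xs.length)).length = xs.length * pvNPk (xs.length - 1) k
    rw [List.length_flatMap]
    rw [List.map_congr_left (g := fun _ => pvNPk (xs.length - 1) k) ?_]
    · rw [List.map_const', List.sum_replicate, smul_eq_mul, List.length_range]
    · intro i hi
      rw [List.mem_range] at hi
      rw [List.getElem?_eq_getElem hi]
      simp only [List.length_map, ih, List.length_eraseIdx, if_pos hi]

-- indexing a flatten of equal-length blocks
theorem pvFlatten_getElem {α : Type} (B : Nat) (hB : 0 < B) :
    ∀ (L : List (List α)) (r : Nat), (∀ l ∈ L, l.length = B) → r < L.length * B →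
    L.flatten[r]? = (match L[r / B]? with | some l => l[r % B]? | none => none) := by
  intro L
  induction L with
  | nil => intro r _ hr; simp at hr
  | cons l L ih =>
    intro r hlen hr
    have hl : l.length = B := hlen l (List.mem_cons_self)
    rw [List.flatten_cons]
    by_cases hcase : r < B
    · have h1 : r < l.length := by omega
      rw [List.getElem?_append_left h1, Nat.div_eq_of_lt hcase, Nat.mod_eq_of_lt hcase]
      rfl
    · obtain ⟨r', rfl⟩ : ∃ r', r = r' + B := ⟨r - B, by omega⟩
      have h2 : l.length ≤ r' + B := by omega
      rw [List.getElem?_append_right h2, hl, Nat.add_sub_cancel,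
        Nat.add_div_right _ hB, Nat.add_mod_right]
      have hr' : r' < L.length * B := by
        rw [List.length_cons] at hr
        have : (L.length + 1) * B = L.length * B + B := by ring
        omega
      rw [ih r' (fun x hx => hlen x (List.mem_cons_of_mem _ hx)) hr']
      rfl

-- the rank-r element of the permutation list is the unranking of r
theorem pvPerm_getElem (k : Nat) : ∀ (xs : List Char) (r : Nat), r < pvNPk xs.length k →
    (PySem.List.permutations xs k)[r]? = some (pvUnrankB xs k r) := by
  induction k with
  | zero =>
    intro xs r hr
    have : r = 0 := by simpa [pvNPk] using hr
    subst this; rfl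
  | succ k ih =>
    intro xs r hr
    have hrB : r < xs.length * pvNPk (xs.length - 1) k := by simpa [pvNPk] using hr
    have hBpos : 0 < pvNPk (xs.length - 1) k := by
      rcases Nat.eq_zero_or_pos (pvNPk (xs.length - 1) k) with h | h
      · rw [h, Nat.mul_zero] at hrB; omega
      · exact h
    have hdiv : r / pvNPk (xs.length - 1) k < xs.length :=
      Nat.div_lt_of_lt_mul (by rw [Nat.mul_comm]; exact hrB)
    have hmod : r % pvNPk (xs.length - 1) k < pvNPk (xs.length - 1) k := Nat.mod_lt _ hBpos
    show (List.flatMap _ (List.range xs.length))[r]? = _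
    rw [List.flatMap_def,
      List.map_congr_left (l := List.range xs.length)
        (g := fun i => (PySem.List.permutations (xs.eraseIdx i) k).map (fun p => (xs.getD i ' ') :: p))
        (by
          intro i hi
          rw [List.mem_range] at hi
          simp only [List.getElem?_eq_getElem hi, List.getD_eq_getElem _ _ hi])]
    have hlen : ∀ l ∈ List.map
        (fun i => (PySem.List.permutations (xs.eraseIdx i) k).map (fun p => (xs.getD i ' ') :: p))
        (List.range xs.length), l.length = pvNPk (xs.length - 1) k := by
      intro l hl
      rw [List.mem_map] at hl
      obtain ⟨i, hi, rfl⟩ := hl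
      rw [List.mem_range] at hi
      simp only [List.length_map, pvPerm_length, List.length_eraseIdx, if_pos hi]
    rw [pvFlatten_getElem _ hBpos _ r hlen
      (by rw [List.length_map, List.length_range]; exact hrB)]
    rw [List.getElem?_map, List.getElem?_range hdiv]
    show ((PySem.List.permutations (xs.eraseIdx (r / pvNPk (xs.length - 1) k)) k).map
        (fun p => (xs.getD (r / pvNPk (xs.length - 1) k) ' ') :: p))[r % pvNPk (xs.length - 1) k]? = _
    have herase : (xs.eraseIdx (r / pvNPk (xs.length - 1) k)).length = xs.length - 1 := by
      rw [List.length_eraseIdx, if_pos hdiv]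
    rw [List.getElem?_map, ih _ _ (by rw [herase]; exact hmod)]
    rw [pvUnrankB, List.getElem?_eq_getElem hdiv, List.getD_eq_getElem _ _ hdiv]
    rfl

-- length of an unranked permutation
theorem pvUnrank_length (k : Nat) : ∀ (xs : List Char) (r : Nat), r < pvNPk xs.length k →
    (pvUnrankB xs k r).length = k := by
  induction k with
  | zero => intro xs r _; rfl
  | succ k ih =>
    intro xs r hr
    have hrB : r < xs.length * pvNPk (xs.length - 1) k := by simpa [pvNPk] using hr
    have hBpos : 0 < pvNPk (xs.length - 1) k := by
      rcases Nat.eq_zero_or_pos (pvNPk (xs.length - 1) k) with h | h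
      · rw [h, Nat.mul_zero] at hrB; omega
      · exact h
    have hdiv : r / pvNPk (xs.length - 1) k < xs.length :=
      Nat.div_lt_of_lt_mul (by rw [Nat.mul_comm]; exact hrB)
    have hmod : r % pvNPk (xs.length - 1) k < pvNPk (xs.length - 1) k := Nat.mod_lt _ hBpos
    have herase : (xs.eraseIdx (r / pvNPk (xs.length - 1) k)).length = xs.length - 1 := by
      rw [List.length_eraseIdx, if_pos hdiv]
    rw [pvUnrankB, List.getElem?_eq_getElem hdiv]
    show (xs[r / pvNPk (xs.length - 1) k] ::
      pvUnrankB (xs.eraseIdx (r / pvNPk (xs.length - 1) k)) k (r % pvNPk (xs.length - 1) k)).length = k + 1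
    rw [List.length_cons, ih _ _ (by rw [herase]; exact hmod)]

-- rank ∘ unrank = id (on a duplicate-free alphabet)
theorem pvRank_unrank (k : Nat) : ∀ (xs : List Char), xs.Nodup → ∀ (r : Nat),
    r < pvNPk xs.length k → pvRankB xs (pvUnrankB xs k r) = some (r) := by
  induction k with
  | zero =>
    intro xs _ r hr
    have : r = 0 := by simpa [pvNPk] using hr
    subst this; rfl
  | succ k ih =>
    intro xs hnd r hr
    have hrB : r < xs.length * pvNPk (xs.length - 1) k := by simpa [pvNPk] using hr
    have hBpos : 0 < pvNPk (xs.length - 1) k := by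
      rcases Nat.eq_zero_or_pos (pvNPk (xs.length - 1) k) with h | h
      · rw [h, Nat.mul_zero] at hrB; omega
      · exact h
    have hdiv : r / pvNPk (xs.length - 1) k < xs.length :=
      Nat.div_lt_of_lt_mul (by rw [Nat.mul_comm]; exact hrB)
    have hmod : r % pvNPk (xs.length - 1) k < pvNPk (xs.length - 1) k := Nat.mod_lt _ hBpos
    have herase : (xs.eraseIdx (r / pvNPk (xs.length - 1) k)).length = xs.length - 1 := by
      rw [List.length_eraseIdx, if_pos hdiv]
    rw [pvUnrankB, List.getElem?_eq_getElem hdiv]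
    show pvRankB xs (xs[r / pvNPk (xs.length - 1) k] ::
      pvUnrankB (xs.eraseIdx (r / pvNPk (xs.length - 1) k)) k (r % pvNPk (xs.length - 1) k)) = some r
    have hidx : xs.idxOf? xs[r / pvNPk (xs.length - 1) k] = some (r / pvNPk (xs.length - 1) k) := by
      rw [List.idxOf?_eq_some_iff]
      exact ⟨hdiv, rfl, fun j hj he => by
        have := (List.Nodup.getElem_inj_iff hnd (hi := by omega) (hj := hdiv)).mp he
        omega⟩
    have hrec : pvRankB (xs.eraseIdx (r / pvNPk (xs.length - 1) k))
        (pvUnrankB (xs.eraseIdx (r / pvNPk (xs.length - 1) k)) k (r % pvNPk (xs.length - 1) k))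
        = some (r % pvNPk (xs.length - 1) k) :=
      ih _ (List.Nodup.eraseIdx _ hnd) _ (by rw [herase]; exact hmod)
    have hlenu : (pvUnrankB (xs.eraseIdx (r / pvNPk (xs.length - 1) k)) k
        (r % pvNPk (xs.length - 1) k)).length = k :=
      pvUnrank_length k _ _ (by rw [herase]; exact hmod)
    simp only [pvRankB, hidx, hrec, hlenu]
    congr 1
    rw [Nat.mul_comm]
    exact Nat.div_add_mod r _

-- unrank ∘ rank = id, with the rank bound
theorem pvUnrank_rank (p : List Char) : ∀ (xs : List Char) (r : Nat), pvRankB xs p = some r →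
    r < pvNPk xs.length p.length ∧ pvUnrankB xs p.length r = p := by
  induction p with
  | nil =>
    intro xs r h
    have : r = 0 := by
      rw [pvRankB] at h
      exact (Option.some_inj.mp h).symm
    subst this
    exact ⟨by simp [pvNPk], rfl⟩
  | cons c p ih =>
    intro xs r h
    cases hi : xs.idxOf? c with
    | none => simp [pvRankB, hi] at h
    | some i =>
      cases hsub : pvRankB (xs.eraseIdx i) p with
      | none => simp [pvRankB, hi, hsub] at h
      | some r' =>
        simp only [pvRankB, hi, hsub, Option.some_inj] at h
        have hr : r = i * pvNPk (xs.length - 1) p.length + r' := h.symm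
        obtain ⟨hilt, hic, -⟩ := List.idxOf?_eq_some_iff.mp hi
        have herase : (xs.eraseIdx i).length = xs.length - 1 := by
          rw [List.length_eraseIdx, if_pos hilt]
        obtain ⟨hr'lt, hunr⟩ := ih (xs.eraseIdx i) r' hsub
        rw [herase] at hr'lt
        have hBpos : 0 < pvNPk (xs.length - 1) p.length := by omega
        constructor
        · show r < pvNPk xs.length (p.length + 1)
          have : pvNPk xs.length (p.length + 1) = xs.length * pvNPk (xs.length - 1) p.length := rfl
          rw [this, hr]
          calc i * pvNPk (xs.length - 1) p.length + r'
              < (i + 1) * pvNPk (xs.length - 1) p.length := by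
                rw [Nat.succ_mul]; omega
            _ ≤ xs.length * pvNPk (xs.length - 1) p.length :=
                Nat.mul_le_mul_right _ (by omega)
        · have hdiv : r / pvNPk (xs.length - 1) p.length = i := by
            rw [hr, Nat.mul_comm i, Nat.mul_add_div hBpos, Nat.div_eq_of_lt hr'lt]
            omega
          have hmod : r % pvNPk (xs.length - 1) p.length = r' := by
            rw [hr, Nat.mul_comm i, Nat.mul_add_mod, Nat.mod_eq_of_lt hr'lt]
          show pvUnrankB xs (p.length + 1) r = c :: p
          rw [pvUnrankB, hdiv, hmod, List.getElem?_eq_getElem hilt]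
          show xs[i] :: pvUnrankB (xs.eraseIdx i) p.length r' = c :: p
          rw [hic, hunr]

-- the gap scan on a sorted list computes the least absent number ≥ m
theorem pvFirstGap_spec (l : List Nat) : ∀ (m : Nat), List.Pairwise (· ≤ ·) l →
    m ≤ pvFirstGap l m ∧ pvFirstGap l m ∉ l ∧
      ∀ j, m ≤ j → j < pvFirstGap l m → j ∈ l := by
  induction l with
  | nil =>
    intro m _
    exact ⟨le_refl _, List.not_mem_nil, fun j hj hj' => absurd (lt_of_le_of_lt hj hj') (lt_irrefl _)⟩
  | cons x xs ih =>
    intro m hp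
    have hx : ∀ y ∈ xs, x ≤ y := (List.pairwise_cons.mp hp).1
    have hxs : List.Pairwise (· ≤ ·) xs := (List.pairwise_cons.mp hp).2
    rw [pvFirstGap]
    by_cases h1 : x = m
    · rw [if_pos h1]
      obtain ⟨hle, hnm, hall⟩ := ih (m + 1) hxs
      refine ⟨by omega, ?_, ?_⟩
      · intro hmem
        rcases List.mem_cons.mp hmem with h | h
        · omega
        · exact hnm h
      · intro j hj hj'
        by_cases hjm : j = m
        · subst hjm; subst h1; exact List.mem_cons_self
        · exact List.mem_cons_of_mem _ (hall j (by omega) hj')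
    · rw [if_neg h1]
      by_cases h2 : m < x
      · rw [if_pos h2]
        refine ⟨le_refl _, ?_, fun j hj hj' => absurd (lt_of_le_of_lt hj hj') (lt_irrefl _)⟩
        intro hmem
        rcases List.mem_cons.mp hmem with h | h
        · omega
        · have := hx m h; omega
      · rw [if_neg h2]
        obtain ⟨hle, hnm, hall⟩ := ih m hxs
        refine ⟨hle, ?_, ?_⟩
        · intro hmem
          rcases List.mem_cons.mp hmem with h | h
          · omega
          · exact hnm h
        · intro j hj hj'
          exact List.mem_cons_of_mem _ (hall j hj hj')

-- find? returns the element at the first satisfying index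
theorem pvFind_some (L : List String) (p : String → Bool) :
    ∀ (i : Nat) (hi : i < L.length), (∀ j (hj : j < i), p (L[j]'(by omega)) = false) →
    p (L[i]) = true → L.find? p = some L[i] := by
  induction L with
  | nil => intro i hi; simp at hi
  | cons a L ih =>
    intro i hi hprev hsat
    cases i with
    | zero =>
      rw [List.find?_cons]
      have : p a = true := hsat
      rw [this]
      rfl
    | succ i =>
      have ha : p a = false := hprev 0 (Nat.succ_pos _)
      rw [List.find?_cons, ha]
      have hi' : i < L.length := by
        rw [List.length_cons] at hi; omega
      have hprev' : ∀ j (hj : j < i), p (L[j]'(by omega)) = false := by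
        intro j hj
        have := hprev (j + 1) (by omega)
        simpa using this
      have hsat' : p (L[i]) = true := by simpa using hsat
      simpa using ih i hi' hprev' hsat'

-- membership in B's rank list, characterised
-- the foldl accumulation is a filterMap
theorem pvRanksB_eq (first : Char) (count : Nat) : ∀ (used : List String) (acc : List Nat),
    used.foldl (fun acc u =>
      match u.toList with
      | [] => acc
      | c :: p =>
        if p.length = count && c == first then
          match pvRankB pvEasyChars p with
          | some r => acc ++ [r]
          | none => acc
        else acc) acc
    = acc ++ used.filterMap (fun u =>
        match u.toList with
        | [] => none
        | c :: p => if p.length = count && c == first then pvRankB pvEasyChars p else none) := by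
  intro used
  induction used with
  | nil => intro acc; simp
  | cons u us ih =>
    intro acc
    rw [List.foldl_cons, List.filterMap_cons]
    cases hu : u.toList with
    | nil =>
      simp only [hu]
      exact ih acc
    | cons c p =>
      simp only [hu]
      by_cases hcond : (p.length = count && c == first) = true
      · rw [if_pos hcond, if_pos hcond]
        cases hrk : pvRankB pvEasyChars p with
        | none => exact ih acc
        | some rv =>
          rw [ih (acc ++ [rv]), List.append_assoc, List.singleton_append]
      · rw [if_neg hcond, if_neg hcond]
        exact ih acc

theorem pvMem_ranks (used : List String) (first : Char) (count : Nat) (j : Nat) :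
    j ∈ pvRanksB used first count ↔
      ∃ u ∈ used, ∃ p : List Char, u.toList = first :: p ∧ p.length = count ∧
        pvRankB pvEasyChars p = some j := by
  rw [pvRanksB, pvRanksB_eq, List.nil_append, List.mem_filterMap]
  constructor
  · rintro ⟨u, hu, hg⟩
    refine ⟨u, hu, ?_⟩
    cases ht : u.toList with
    | nil => simp [ht] at hg
    | cons c p =>
      simp only [ht] at hg
      by_cases hcond : (p.length = count && c == first) = true
      · rw [if_pos hcond] at hg
        have hc : c = first := by
          have := (Bool.and_eq_true _ _).mp hcond
          exact beq_iff_eq.mp this.2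
        have hl : p.length = count := by
          have := (Bool.and_eq_true _ _).mp hcond
          exact of_decide_eq_true this.1
        exact ⟨p, by simp [ht, hc], hl, hg⟩
      · rw [if_neg hcond] at hg; cases hg
  · rintro ⟨u, hu, p, ht, hl, hrk⟩
    refine ⟨u, hu, ?_⟩
    simp only [ht]
    rw [if_pos (by simp [hl])]
    exact hrk

-- the stage equivalence: A's permutation scan = B's rank-gap arithmetic
theorem pvStage_eq (used : List String) (first : Char) (count : Nat) :
    pvPermScanA first used (PySem.List.permutations pvEasyChars count)
      = (let m := pvFirstGap ((pvRanksB used first count).mergeSort (· ≤ ·)) 0;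
         if m < pvNPk pvEasyChars.length count then
           some (String.ofList (first :: pvUnrankB pvEasyChars count m))
         else none) := by
  have hpair : List.Pairwise (· ≤ ·) ((pvRanksB used first count).mergeSort (· ≤ ·)) := by
    have := List.pairwise_mergeSort (le := fun a b : Nat => decide (a ≤ b))
      (fun a b c hab hbc => by simp only [decide_eq_true_eq] at *; omega)
      (fun a b => by simp only [Bool.or_eq_true, decide_eq_true_eq]; omega)
      (pvRanksB used first count)
    exact this.imp (fun h => by simpa using h)
  obtain ⟨-, hnm, hall⟩ :=
    pvFirstGap_spec ((pvRanksB used first count).mergeSort (· ≤ ·)) 0 hpair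
  -- translate mergeSort membership back to the rank list
  have hnmR : pvFirstGap ((pvRanksB used first count).mergeSort (· ≤ ·)) 0 ∉
      pvRanksB used first count := fun h => hnm (List.mem_mergeSort.mpr h)
  have hallR : ∀ j, j < pvFirstGap ((pvRanksB used first count).mergeSort (· ≤ ·)) 0 →
      j ∈ pvRanksB used first count :=
    fun j hj => List.mem_mergeSort.mp (hall j (Nat.zero_le _) hj)
  -- the two consequences of rank membership
  have hC1 : ∀ j ∈ pvRanksB used first count, j < pvNPk pvEasyChars.length count ∧
      String.ofList (first :: pvUnrankB pvEasyChars count j) ∈ used := by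
    intro j hj
    obtain ⟨u, hu, p, ht, hl, hrk⟩ := (pvMem_ranks used first count j).mp hj
    obtain ⟨hlt, hunr⟩ := pvUnrank_rank p pvEasyChars j hrk
    rw [hl] at hlt hunr
    refine ⟨hlt, ?_⟩
    rw [hunr, ← ht, String.ofList_toList]
    exact hu
  have hC2 : ∀ j, j < pvNPk pvEasyChars.length count →
      String.ofList (first :: pvUnrankB pvEasyChars count j) ∈ used →
      j ∈ pvRanksB used first count := by
    intro j hjlt hmem
    refine (pvMem_ranks used first count j).mpr
      ⟨String.ofList (first :: pvUnrankB pvEasyChars count j), hmem,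
        pvUnrankB pvEasyChars count j, String.toList_ofList, pvUnrank_length count _ _ hjlt,
        pvRank_unrank count pvEasyChars pvEasyChars_nodup j hjlt⟩
  rw [pvPermScanA_eq_find]
  have hlenL : ((PySem.List.permutations pvEasyChars count).map
      (fun p => String.ofList (first :: p))).length = pvNPk pvEasyChars.length count := by
    rw [List.length_map, pvPerm_length]
  have hgetL : ∀ j (hj : j < pvNPk pvEasyChars.length count),
      ((PySem.List.permutations pvEasyChars count).map
        (fun p => String.ofList (first :: p)))[j]'(by rw [hlenL]; exact hj)
      = String.ofList (first :: pvUnrankB pvEasyChars count j) := by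
    intro j hj
    have : ((PySem.List.permutations pvEasyChars count).map
        (fun p => String.ofList (first :: p)))[j]? =
        some (String.ofList (first :: pvUnrankB pvEasyChars count j)) := by
      rw [List.getElem?_map, pvPerm_getElem count pvEasyChars j hj]
      rfl
    obtain ⟨h', he⟩ := List.getElem?_eq_some_iff.mp this
    exact he
  show _ = (if pvFirstGap ((pvRanksB used first count).mergeSort (· ≤ ·)) 0
        < pvNPk pvEasyChars.length count then
      some (String.ofList (first :: pvUnrankB pvEasyChars count
        (pvFirstGap ((pvRanksB used first count).mergeSort (· ≤ ·)) 0)))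
    else none)
  by_cases hm : pvFirstGap ((pvRanksB used first count).mergeSort (· ≤ ·)) 0
      < pvNPk pvEasyChars.length count
  · rw [if_pos hm]
    have hfind := pvFind_some ((PySem.List.permutations pvEasyChars count).map
        (fun p => String.ofList (first :: p))) (fun c => !used.contains c)
      (pvFirstGap ((pvRanksB used first count).mergeSort (· ≤ ·)) 0)
      (by rw [hlenL]; exact hm)
      (by
        intro j hj
        have hjlt : j < pvNPk pvEasyChars.length count := by omega
        rw [hgetL j hjlt]
        have := (hC1 j (hallR j hj)).2
        simp [List.contains_iff_mem, this])
      (by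
        rw [hgetL _ hm]
        by_cases hmem : String.ofList (first :: pvUnrankB pvEasyChars count
            (pvFirstGap ((pvRanksB used first count).mergeSort (· ≤ ·)) 0)) ∈ used
        · exact absurd (hC2 _ hm hmem) hnmR
        · simp only [Bool.not_eq_true']
          exact (Bool.not_eq_true _).mp (fun h => hmem (List.contains_iff_mem.mp h)))
    rw [hfind, hgetL _ hm]
  · rw [if_neg hm]
    rw [List.find?_eq_none]
    intro x hx
    obtain ⟨j, hj, rfl⟩ := List.mem_iff_getElem.mp hx
    have hjlt : j < pvNPk pvEasyChars.length count := by rw [← hlenL]; exact hj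
    rw [hgetL j hjlt]
    have hjm : j < pvFirstGap ((pvRanksB used first count).mergeSort (· ≤ ·)) 0 := by omega
    have := (hC1 j (hallR j hjm)).2
    simp [List.contains_iff_mem, this]

-- A's while-loop and B's staged loop agree (B's counter runs one ahead)
theorem pvLoopA_eq_loopB (cmd : String) (cmdL : List Char) (first : Char)
    (used : List String) (fuel : Nat) : ∀ (count : Nat),
    pvLoopA cmd cmdL first used count fuel
      = (pvLoopB cmdL first used (count + 1) fuel).getD cmd := by
  induction fuel with
  | zero => intro count; rfl
  | succ n ih =>
    intro count
    rw [pvLoopA, pvLoopB]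
    show (if used.contains (String.ofList (cmdL.take (count + 1 + 1))) then _ else _)
        = ((if used.contains (String.ofList (cmdL.take (count + 1 + 1))) then _
            else some (String.ofList (cmdL.take (count + 1 + 1)))).getD cmd)
    cases hb : used.contains (String.ofList (cmdL.take (count + 1 + 1))) with
    | true =>
      rw [if_pos rfl, if_pos rfl]
      rw [pvStage_eq used first (count + 1)]
      cases hm : (pvFirstGap ((pvRanksB used first (count + 1)).mergeSort (· ≤ ·)) 0
          < pvNPk pvEasyChars.length (count + 1) : Bool) with
      | true =>
        simp only [decide_eq_true_eq] at hm
        rw [if_pos hm, if_pos hm]; rfl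
      | false =>
        simp only [decide_eq_false_iff_not] at hm
        rw [if_neg hm, if_neg hm]
        exact ih (count + 1)
    | false => rw [if_neg (by simp), if_neg (by simp)]; rfl

theorem generate_easy_alias_spec : Claim_equal_generate_easy_alias := by
  intro cmd used _ hpre
  unfold Spec_generate_easy_alias generate_easy_alias generate_easy_alias_alt
  cases hc : cmd.toList with
  | nil => exact absurd (String.toList_eq_nil_iff.mp hc) hpre
  | cons first rest =>
    show (if used.contains (String.ofList [first]) then
            pvLoopA cmd (first :: rest) first used 0 (first :: rest).length
          else String.ofList [first])
        = (if used.contains (String.ofList [first]) then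
            (pvLoopB (first :: rest) first used 1 (first :: rest).length).getD cmd
          else String.ofList [first])
    cases hb : used.contains (String.ofList [first]) with
    | true =>
      rw [if_pos rfl, if_pos rfl]
      exact pvLoopA_eq_loopB cmd (first :: rest) first used (first :: rest).length 0
    | false => rw [if_neg (by simp), if_neg (by simp)]
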